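-- pv_equiv track=rewrite | github.com/gabsdnker/IFC | Algoritimos/Lista-7/GD-Alg-07-Ex-09.py | vencedor_diagonal
-- ===== SOURCE A (Python) =====
-- def vencedor_diagonal(bingo):
--     valores = bingo.values()
--     soma_diagonal = 0
--     contador = 0
--     for lista in valores:
--         contador = contador + 1
--         contador2 = 0
--         for item in lista:
--             contador2 = contador2 + 1
--             if contador == contador2:
--                 soma_diagonal = soma_diagonal + item
--
--     soma_diagona_lop = 0
--     contador3 = 0
--     for lista in valores:
--         contador3 = contador3 + 1
--         contador4 = 0
--         for item in lista:
--             contador4 = contador4 + 1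
--             if contador3 + contador4 == 6:
--                 soma_diagona_lop += item
--
--     if soma_diagona_lop == 0 or soma_diagonal == 0:
--         return True
-- ===== SOURCE B (Python) =====
-- def vencedor_diagonal(bingo):
--     rows = list(bingo.values())
--     soma_diagonal = sum(row[i] for i, row in enumerate(rows) if i < len(row))
--     soma_diagona_lop = sum(row[4 - i] for i, row in enumerate(rows) if 0 <= 4 - i < len(row))
--     if soma_diagona_lop == 0 or soma_diagonal == 0:
--         return True
-- ===== Notes on version B (the rewrite author's own statement) =====
-- stated objective: simpler
-- what changed: Replaces the two counter-driven nested scans with direct guarded indexing row[i] / row[4-i] over enumerate(rows), so each diagonal sum is one comprehension with no inner loop.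
import Mathlib
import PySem

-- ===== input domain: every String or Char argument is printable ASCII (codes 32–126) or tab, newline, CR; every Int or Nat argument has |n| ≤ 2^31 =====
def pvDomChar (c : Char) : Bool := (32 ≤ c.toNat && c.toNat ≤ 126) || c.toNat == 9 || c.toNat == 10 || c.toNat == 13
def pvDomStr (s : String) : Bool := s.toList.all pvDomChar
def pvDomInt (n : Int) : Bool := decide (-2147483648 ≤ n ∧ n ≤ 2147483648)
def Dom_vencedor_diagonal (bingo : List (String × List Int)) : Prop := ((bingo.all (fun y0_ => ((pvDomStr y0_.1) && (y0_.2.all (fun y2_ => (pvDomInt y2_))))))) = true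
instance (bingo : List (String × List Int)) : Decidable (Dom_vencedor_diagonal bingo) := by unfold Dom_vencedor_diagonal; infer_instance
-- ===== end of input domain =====

-- B replaces the counter-driven nested scans with direct guarded indexing over enumerate(rows): simpler, no inner loop.

-- ===== PORT A =====
-- inner loop body shared by both of A's passes: the 1-based item counter, adding when it hits `target`
def pvInnerA (target : Int) (st : Int × Int) (item : Int) : Int × Int :=
  let c2 := st.2 + 1
  (if target = c2 then st.1 + item else st.1, c2)

def vencedor_diagonal (bingo : List (String × List Int)) : Option Bool :=
  let valores := bingo.map Prod.snd
  let p1 := valores.foldl (fun (acc : Int × Int) lista =>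
      let contador := acc.2 + 1
      ((lista.foldl (pvInnerA contador) (acc.1, 0)).1, contador)) (0, 0)
  let soma_diagonal := p1.1
  let p2 := valores.foldl (fun (acc : Int × Int) lista =>
      let contador3 := acc.2 + 1
      ((lista.foldl (pvInnerA (6 - contador3)) (acc.1, 0)).1, contador3)) (0, 0)
  let soma_diagona_lop := p2.1
  if soma_diagona_lop = 0 ∨ soma_diagonal = 0 then some true else none

-- ===== PORT B =====
def vencedor_diagonal_alt (bingo : List (String × List Int)) : Option Bool :=
  let rows := bingo.map Prod.snd
  let soma_diagonal : Int := ((PySem.List.enumerate rows 0).filterMap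
      (fun p => if p.1 < (p.2.length : Int) then PySem.List.pyGet? p.2 p.1 else none)).sum
  let soma_diagona_lop : Int := ((PySem.List.enumerate rows 0).filterMap
      (fun p => if 0 ≤ 4 - p.1 ∧ 4 - p.1 < (p.2.length : Int) then PySem.List.pyGet? p.2 (4 - p.1) else none)).sum
  if soma_diagona_lop = 0 ∨ soma_diagonal = 0 then some true else none

-- ===== PRECONDITION & SPEC =====
def Spec_vencedor_diagonal (bingo : List (String × List Int)) (out : Option Bool) : Prop := out = vencedor_diagonal_alt bingo
instance (bingo : List (String × List Int)) (out : Option Bool) : Decidable (Spec_vencedor_diagonal bingo out) := by unfold Spec_vencedor_diagonal; infer_instance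

-- ===== CLAIM (what is proved, stated in full; the proofs are below) =====
def Claim_equal_vencedor_diagonal : Prop := ∀ (bingo : List (String × List Int)), Dom_vencedor_diagonal bingo → Spec_vencedor_diagonal bingo (vencedor_diagonal bingo)

-- ===== LEMMAS AND PROOFS =====

-- `l[j]` as an Int-indexed total lookup defaulting to 0 (no negative wraparound)
def getZ (l : List Int) (j : Int) : Int :=
  if 0 ≤ j then (l[j.toNat]?).getD 0 else 0

theorem getZ_nil (j : Int) : getZ [] j = 0 := by
  simp [getZ]

theorem getZ_neg (l : List Int) (j : Int) (h : j < 0) : getZ l j = 0 := by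
  have h' : ¬ 0 ≤ j := by omega
  simp [getZ, h']

theorem getZ_cons (a : Int) (l : List Int) (j : Int) :
    getZ (a :: l) j = if j = 0 then a else getZ l (j - 1) := by
  unfold getZ
  by_cases h0 : j = 0
  · simp [h0]
  · by_cases hp : 0 ≤ j
    · have h1 : 0 ≤ j - 1 := by omega
      have ht : j.toNat = (j - 1).toNat + 1 := by omega
      rw [if_pos hp, if_neg h0, if_pos h1, ht]
      simp
    · have h1 : ¬ 0 ≤ j - 1 := by omega
      rw [if_neg hp, if_neg h0, if_neg h1]

theorem innerA_eq (t : Int) : ∀ (l : List Int) (s c2 : Int),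
    (l.foldl (pvInnerA t) (s, c2)).1 = s + getZ l (t - c2 - 1) := by
  intro l
  induction l with
  | nil => intro s c2; simp [getZ_nil]
  | cons a l ih =>
    intro s c2
    simp only [List.foldl_cons, pvInnerA]
    rw [getZ_cons, ih]
    by_cases h : t = c2 + 1
    · have h0 : t - c2 - 1 = 0 := by omega
      have hneg : getZ l (t - (c2 + 1) - 1) = 0 := getZ_neg _ _ (by omega)
      rw [if_pos h, if_pos h0, hneg]
      ring
    · have h0 : ¬ t - c2 - 1 = 0 := by omega
      have he : t - (c2 + 1) - 1 = t - c2 - 1 - 1 := by ring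
      rw [if_neg h, if_neg h0, he]

-- value of A's first (main-diagonal) pass, parametrised by the starting row counter
def diagA : List (List Int) → Int → Int
  | [], _ => 0
  | r :: rs, c => getZ r c + diagA rs (c + 1)

-- value of A's second (anti-diagonal) pass
def adiagA : List (List Int) → Int → Int
  | [], _ => 0
  | r :: rs, c => getZ r (4 - c) + adiagA rs (c + 1)

theorem outerA_diag : ∀ (rows : List (List Int)) (s c : Int),
    (rows.foldl (fun (acc : Int × Int) lista =>
        let contador := acc.2 + 1
        ((lista.foldl (pvInnerA contador) (acc.1, 0)).1, contador)) (s, c)).1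
      = s + diagA rows c := by
  intro rows
  induction rows with
  | nil => intro s c; simp [diagA]
  | cons r rs ih =>
    intro s c
    simp only [List.foldl_cons, diagA]
    rw [ih, innerA_eq]
    have : c + 1 - 0 - 1 = c := by ring
    rw [this]; ring

theorem outerA_adiag : ∀ (rows : List (List Int)) (s c : Int),
    (rows.foldl (fun (acc : Int × Int) lista =>
        let contador3 := acc.2 + 1
        ((lista.foldl (pvInnerA (6 - contador3)) (acc.1, 0)).1, contador3)) (s, c)).1
      = s + adiagA rows c := by
  intro rows
  induction rows with
  | nil => intro s c; simp [adiagA]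
  | cons r rs ih =>
    intro s c
    simp only [List.foldl_cons, adiagA]
    rw [ih, innerA_eq]
    have : 6 - (c + 1) - 0 - 1 = 4 - c := by ring
    rw [this]; ring

theorem sumB_diag : ∀ (rows : List (List Int)) (s : Int), 0 ≤ s →
    ((PySem.List.enumerate rows s).filterMap
        (fun p => if p.1 < (p.2.length : Int) then PySem.List.pyGet? p.2 p.1 else none)).sum
      = diagA rows s := by
  intro rows
  induction rows with
  | nil => intro s _; simp [PySem.List.enumerate_nil, diagA]
  | cons r rs ih =>
    intro s hs
    rw [PySem.List.enumerate_cons, List.filterMap_cons]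
    by_cases h : s < (r.length : Int)
    · have hsome : PySem.List.pyGet? r s = some r[s.toNat] := by
        apply PySem.List.pyGet?_eq_some_getElem <;> omega
      simp only [if_pos h, hsome]
      simp only [List.sum_cons, diagA]
      rw [ih (s + 1) (by omega)]
      have hg : getZ r s = r[s.toNat] := by
        simp [getZ, hs, List.getElem?_eq_getElem (show s.toNat < r.length by omega)]
      rw [hg]
    · simp only [if_neg h]
      simp only [diagA]
      rw [ih (s + 1) (by omega)]
      have hg : getZ r s = 0 := by
        simp [getZ, hs, List.getElem?_eq_none_iff.mpr (show r.length ≤ s.toNat by omega)]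
      rw [hg]; ring

theorem sumB_adiag : ∀ (rows : List (List Int)) (s : Int), 0 ≤ s →
    ((PySem.List.enumerate rows s).filterMap
        (fun p => if 0 ≤ 4 - p.1 ∧ 4 - p.1 < (p.2.length : Int) then PySem.List.pyGet? p.2 (4 - p.1) else none)).sum
      = adiagA rows s := by
  intro rows
  induction rows with
  | nil => intro s _; simp [PySem.List.enumerate_nil, adiagA]
  | cons r rs ih =>
    intro s hs
    rw [PySem.List.enumerate_cons, List.filterMap_cons]
    by_cases h : 0 ≤ 4 - s ∧ 4 - s < (r.length : Int)
    · have hsome : PySem.List.pyGet? r (4 - s) = some r[(4 - s).toNat] := by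
        apply PySem.List.pyGet?_eq_some_getElem <;> omega
      simp only [if_pos h, hsome]
      simp only [List.sum_cons, adiagA]
      rw [ih (s + 1) (by omega)]
      have hg : getZ r (4 - s) = r[(4 - s).toNat] := by
        unfold getZ
        rw [if_pos h.1]
        simp [List.getElem?_eq_getElem (show (4 - s).toNat < r.length by omega)]
      rw [hg]
    · simp only [if_neg h]
      simp only [adiagA]
      rw [ih (s + 1) (by omega)]
      have hg : getZ r (4 - s) = 0 := by
        by_cases h0 : 0 ≤ 4 - s
        · unfold getZ
          rw [if_pos h0]
          simp [List.getElem?_eq_none_iff.mpr (show r.length ≤ (4 - s).toNat by omega)]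
        · unfold getZ
          rw [if_neg h0]
      rw [hg]; ring

-- ===== VERDICT (by name: the statement is the Claim_ definition above) =====
theorem vencedor_diagonal_spec : Claim_equal_vencedor_diagonal := by
  intro bingo _
  unfold Spec_vencedor_diagonal vencedor_diagonal vencedor_diagonal_alt
  simp only
  rw [outerA_diag, outerA_adiag, sumB_diag _ 0 (by omega), sumB_adiag _ 0 (by omega)]
  simp
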